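-- pv_equiv track=rewrite | github.com/DataTrainingFoundations/DataTrainingRepo | Week2/Examples/CodingChallenges/re_occurrence.py | has_reoccurrence
-- ===== SOURCE A (Python) =====
-- def has_reoccurrence(lst):
--     seen = set()
--     i = 0
--     n = len(lst)
--
--     while i < n:
--         item = lst[i]
--
--         # Skip the current sequence of the same item
--         while i < n and lst[i] == item:
--             i += 1
--
--         # If we have seen this item before, it reoccurs after a break
--         if item in seen:
--             return True
--         seen.add(item)
--
--     return False
-- ===== SOURCE B (Python) =====
-- def has_reoccurrence(lst):
--     # A value reoccurs after a break iff some position j starts a new run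
--     # (its value differs from its left neighbour) of a value that already
--     # appears somewhere in the raw prefix lst[:j].
--     return any(lst[j] != lst[j - 1] and lst[j] in lst[:j]
--                for j in range(1, len(lst)))
-- ===== Notes on version B (the rewrite author's own statement) =====
-- stated objective: alternative
-- what changed: B drops A's cursor-driven run-skipping loop and its growing seen set entirely: it tests each position j in one any() over range(1, len) for being a run boundary (lst[j] != lst[j-1]) whose value already occurs in the raw prefix lst[:j]; correctness: a value reoccurs after a break exactly when some later run of it starts, i.e. its value differs from the left neighbour yet appears earlier.
import Mathlib
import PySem

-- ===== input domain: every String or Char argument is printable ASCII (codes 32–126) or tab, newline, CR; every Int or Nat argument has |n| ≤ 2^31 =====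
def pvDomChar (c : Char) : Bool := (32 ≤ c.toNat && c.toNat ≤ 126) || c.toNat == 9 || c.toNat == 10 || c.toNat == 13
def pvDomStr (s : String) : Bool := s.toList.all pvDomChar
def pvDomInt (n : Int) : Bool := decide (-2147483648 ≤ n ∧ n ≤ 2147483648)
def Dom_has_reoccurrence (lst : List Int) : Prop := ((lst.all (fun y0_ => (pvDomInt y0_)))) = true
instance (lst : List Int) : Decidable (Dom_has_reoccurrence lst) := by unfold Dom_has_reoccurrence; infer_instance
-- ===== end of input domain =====

-- B replaces A's run-skipping loop with a growing seen-set by a single `any` over the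
-- run boundaries, testing membership in the raw prefix lst[:j]; objective: alternative.

-- ===== PORT A =====
-- A's outer while-loop: take the item at the cursor, skip its whole run (the inner while),
-- return True if it was seen before, else add it to `seen` and continue.
def hasReoccGo (seen : PySem.Set Int) : List Int → Bool
  | [] => false
  | item :: rest =>
    -- inner while: advance past the run of `item`
    let rest' := rest.dropWhile (· == item)
    if PySem.Set.contains seen item then true
    else hasReoccGo (PySem.Set.add seen item) rest'
termination_by l => l.length
decreasing_by
  simp only [List.length_cons]
  exact Nat.lt_succ_of_le (List.length_dropWhile_le _ _)

def has_reoccurrence (lst : List Int) : Bool := hasReoccGo PySem.Set.empty lst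

-- ===== PORT B =====
-- Source B: any(lst[j] != lst[j-1] and lst[j] in lst[:j] for j in range(1, len(lst)))
def has_reoccurrence_alt (lst : List Int) : Bool :=
  (PySem.List.pyRange 1 lst.length 1).any (fun j =>
    decide (PySem.List.pyGet? lst j ≠ PySem.List.pyGet? lst (j - 1)) &&
    (match PySem.List.pyGet? lst j with
     | some x => (PySem.List.slice lst none (some j)).contains x
     | none => false))

-- ===== PRECONDITION & SPEC =====
def Spec_has_reoccurrence (lst : List Int) (out : Bool) : Prop := out = has_reoccurrence_alt lst
instance (lst : List Int) (out : Bool) : Decidable (Spec_has_reoccurrence lst out) := by unfold Spec_has_reoccurrence; infer_instance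

-- ===== CLAIM (what is proved, stated in full; the proofs are below) =====
def Claim_equal_has_reoccurrence : Prop := ∀ (lst : List Int), Dom_has_reoccurrence lst → Spec_has_reoccurrence lst (has_reoccurrence lst)

-- ===== LEMMAS AND PROOFS =====

-- intermediate recursion: walk the suffix keeping the raw prefix and the previous element
def bGo (pref : List Int) (prev : Int) : List Int → Bool
  | [] => false
  | x :: t => (decide (x ≠ prev) && pref.contains x) || bGo (pref ++ [x]) x t

theorem ofList_append_singleton (l : List Int) (x : Int) :
    PySem.Set.ofList (l ++ [x]) = PySem.Set.add (PySem.Set.ofList l) x := by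
  simp [PySem.Set.ofList_eq_foldl]

-- bGo on the suffix equals A's run-skipping loop with seen = set of the prefix
theorem bGo_eq_hasReoccGo (t : List Int) : ∀ (pref : List Int) (prev : Int), prev ∈ pref →
    bGo pref prev t = hasReoccGo (PySem.Set.ofList pref) (t.dropWhile (· == prev)) := by
  induction t with
  | nil => intro pref prev _; simp [bGo, hasReoccGo]
  | cons x t ih =>
    intro pref prev hprev
    by_cases hx : x = prev
    · subst hx
      have hofl : PySem.Set.ofList (pref ++ [x]) = PySem.Set.ofList pref := by
        rw [ofList_append_singleton]
        simp [PySem.Set.add, PySem.Set.mem_ofList, hprev]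
      rw [List.dropWhile_cons_of_pos (by simp)]
      simpa [bGo, hofl] using ih (pref ++ [x]) x (by simp)
    · rw [List.dropWhile_cons_of_neg (by simp [hx])]
      rw [hasReoccGo]
      by_cases hmem : x ∈ pref
      · have : PySem.Set.contains (PySem.Set.ofList pref) x = true := by
          simp [PySem.Set.mem_ofList, hmem]
        simp [bGo, hx, hmem]
      · have hc : PySem.Set.contains (PySem.Set.ofList pref) x = false := by
          simp [PySem.Set.mem_ofList, hmem]
        rw [hc, if_neg (by simp)]
        rw [← ofList_append_singleton]
        simpa [bGo, hx, hmem] using ih (pref ++ [x]) x (by simp)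

-- B's indexed any over range(k, n) equals bGo over take/drop at k
theorem any_range_eq_bGo (lst : List Int) : ∀ (d k : Nat), k + d = lst.length → 1 ≤ k →
    (PySem.List.pyRange (k : Int) (lst.length : Int) 1).any (fun j =>
      decide (PySem.List.pyGet? lst j ≠ PySem.List.pyGet? lst (j - 1)) &&
      (match PySem.List.pyGet? lst j with
       | some x => (PySem.List.slice lst none (some j)).contains x
       | none => false))
    = bGo (lst.take k) (lst.getD (k - 1) 0) (lst.drop k) := by
  intro d
  induction d with
  | zero =>
    intro k hk _
    rw [PySem.List.pyRange_one_eq_nil (by omega)]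
    rw [List.drop_eq_nil_of_le (by omega)]
    simp [bGo]
  | succ d ih =>
    intro k hk hk1
    have hklt : k < lst.length := by omega
    have hk1lt : k - 1 < lst.length := by omega
    rw [PySem.List.pyRange_one_cons (by exact_mod_cast hklt)]
    rw [List.any_cons]
    have hgk : PySem.List.pyGet? lst (k : Int) = some lst[k] := by
      simp [PySem.List.pyGet?_natCast, List.getElem?_eq_getElem hklt]
    have hsub : (k : Int) - 1 = ((k - 1 : Nat) : Int) := by omega
    have hgk1 : PySem.List.pyGet? lst ((k : Int) - 1) = some lst[k - 1] := by
      rw [hsub]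
      simp [PySem.List.pyGet?_natCast, List.getElem?_eq_getElem hk1lt]
    have hslice : PySem.List.slice lst none (some (k : Int)) = lst.take k :=
      PySem.List.slice_to_natCast lst k
    have hdrop : lst.drop k = lst[k] :: lst.drop (k + 1) := List.drop_eq_getElem_cons hklt
    have htake : lst.take (k + 1) = lst.take k ++ [lst[k]] := by
      rw [List.take_add_one, List.getElem?_eq_getElem hklt]; rfl
    have hgetD : lst.getD (k - 1) 0 = lst[k - 1] := List.getD_eq_getElem lst 0 hk1lt
    have hgetD' : lst.getD (k + 1 - 1) 0 = lst[k] := by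
      have : k + 1 - 1 = k := rfl
      rw [this]; exact List.getD_eq_getElem lst 0 hklt
    rw [hdrop, bGo, ← htake]
    have hcast : ((k : Int) + 1) = ((k + 1 : Nat) : Int) := by push_cast; ring
    rw [hcast, ih (k + 1) (by omega) (by omega), hgetD']
    simp [hgk, hgk1, hslice, List.getElem?_eq_getElem hk1lt]

-- ===== VERDICT (by name: the statement is the Claim_ definition above) =====
theorem has_reoccurrence_spec : Claim_equal_has_reoccurrence := by
  unfold Claim_equal_has_reoccurrence
  intro lst _
  unfold Spec_has_reoccurrence has_reoccurrence has_reoccurrence_alt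
  match lst with
  | [] => simp [hasReoccGo, PySem.List.pyRange_one_eq_nil]
  | x :: t =>
    have h := any_range_eq_bGo (x :: t) t.length 1 (by simp [Nat.add_comm]) le_rfl
    rw [(by norm_num : ((1 : Nat) : Int) = (1 : Int))] at h
    rw [h]
    rw [bGo_eq_hasReoccGo _ _ _ (by simp)]
    rw [hasReoccGo]
    have : PySem.Set.contains PySem.Set.empty x = false := rfl
    rw [this, if_neg (by simp)]
    rfl
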